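-- pv_equiv track=rewrite | github.com/pablohello/restart | git/project_deeph/restart_file/old/work_file/restart/deeph_to_restart.py | build_offsets
-- ===== SOURCE A (Python) =====
-- from typing import Dict, Tuple
--
-- def build_offsets(n_orb_site: Dict[int, int]) -> Dict[int, Tuple[int, int]]:
--     offsets: Dict[int, Tuple[int, int]] = {}
--     cur = 0
--     for i in sorted(n_orb_site):
--         n = n_orb_site[i]
--         offsets[i] = (cur, cur + n)
--         cur += n
--     return offsets
-- ===== SOURCE B (Python) =====
-- def build_offsets(n_orb_site):
--     # Divide and conquer: solve each half of the sorted key list independently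
--     # from offset 0, then shift the right half by the left half's total size.
--     def rec(ks):
--         if not ks:
--             return [], 0
--         if len(ks) == 1:
--             n = n_orb_site[ks[0]]
--             return [(ks[0], (0, n))], n
--         mid = len(ks) // 2
--         left, tl = rec(ks[:mid])
--         right, tr = rec(ks[mid:])
--         shifted = [(k, (s + tl, e + tl)) for k, (s, e) in right]
--         return left + shifted, tl + tr
--     pairs, _ = rec(sorted(n_orb_site))
--     return dict(pairs)
-- ===== Notes on version B (the rewrite author's own statement) =====
-- stated objective: alternative
-- what changed: B replaces A's left-to-right loop carrying a running offset by divide and conquer: each half of the sorted key list is solved independently starting from offset 0 and the right half's ranges are then shifted by the left half's total size.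
import Mathlib
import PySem

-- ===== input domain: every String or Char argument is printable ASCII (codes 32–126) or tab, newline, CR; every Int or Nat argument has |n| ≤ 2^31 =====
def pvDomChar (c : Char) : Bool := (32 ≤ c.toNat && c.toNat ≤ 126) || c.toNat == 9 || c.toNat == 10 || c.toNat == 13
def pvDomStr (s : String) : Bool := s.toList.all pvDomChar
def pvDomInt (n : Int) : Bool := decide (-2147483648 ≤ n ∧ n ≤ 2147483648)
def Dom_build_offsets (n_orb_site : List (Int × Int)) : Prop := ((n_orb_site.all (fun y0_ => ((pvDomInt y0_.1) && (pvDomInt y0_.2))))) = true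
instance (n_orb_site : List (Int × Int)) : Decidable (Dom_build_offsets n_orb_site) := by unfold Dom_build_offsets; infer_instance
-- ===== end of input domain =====

-- B replaces A's left-to-right loop with a running offset by divide and conquer: each half of
-- the sorted key list is solved independently from offset 0, the right half then shifted by
-- the left half's total size.

-- ===== PORT A =====
-- A: offsets = {}; cur = 0; for i in sorted(d): n = d[i]; offsets[i] = (cur, cur+n); cur += n
def build_offsets (n_orb_site : List (Int × Int)) : List (Int × Int × Int) :=
  let d : PySem.Dict Int Int := PySem.Dict.mk n_orb_site
  let r := (PySem.List.sorted d.keys (fun x => x) false).foldl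
    (fun (acc : PySem.Dict Int (Int × Int) × Int) i =>
      let n := d.getD i 0
      (acc.1.insert i (acc.2, acc.2 + n), acc.2 + n))
    (PySem.Dict.empty, 0)
  r.1.items

-- ===== PORT B =====
-- helper rec(ks): ([], 0) / singleton base case / split at mid, shift the right result
def recB (sz : Int → Int) (ks : List Int) : List (Int × Int × Int) × Int :=
  match ks with
  | [] => ([], 0)
  | [k] => ([(k, 0, sz k)], sz k)
  | k1 :: k2 :: rest =>
    let l := k1 :: k2 :: rest
    let mid := l.length / 2
    let L := recB sz (l.take mid)
    let R := recB sz (l.drop mid)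
    (L.1 ++ R.1.map (fun p => (p.1, p.2.1 + L.2, p.2.2 + L.2)), L.2 + R.2)
termination_by ks.length
decreasing_by
  · simp [List.length_take]; omega
  · simp [List.length_drop]; omega

def build_offsets_alt (n_orb_site : List (Int × Int)) : List (Int × Int × Int) :=
  let d : PySem.Dict Int Int := PySem.Dict.mk n_orb_site
  let pairs := (recB (fun k => d.getD k 0) (PySem.List.sorted d.keys (fun x => x) false)).1
  (PySem.Dict.ofList pairs).items

-- ===== PRECONDITION & SPEC =====
-- Pre_ excludes association lists with duplicate keys: they do not represent a Python dict
-- (the argument type of A), so A's behaviour on them is not defined by the source.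
def Pre_build_offsets (n_orb_site : List (Int × Int)) : Prop :=
  (n_orb_site.map Prod.fst).Nodup

instance (n_orb_site : List (Int × Int)) : Decidable (Pre_build_offsets n_orb_site) := by
  unfold Pre_build_offsets; infer_instance

def pvWitness_build_offsets : (List (Int × Int)) := [(2, 3), (1, 2)]

def Spec_build_offsets (n_orb_site : List (Int × Int)) (out : List (Int × Int × Int)) : Prop := out = build_offsets_alt n_orb_site
instance (n_orb_site : List (Int × Int)) (out : List (Int × Int × Int)) : Decidable (Spec_build_offsets n_orb_site out) := by unfold Spec_build_offsets; infer_instance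

-- ===== CLAIM (what is proved, stated in full; the proofs are below) =====
def Claim_equal_build_offsets : Prop := ∀ (n_orb_site : List (Int × Int)), Dom_build_offsets n_orb_site → Pre_build_offsets n_orb_site → Spec_build_offsets n_orb_site (build_offsets n_orb_site)

-- ===== LEMMAS AND PROOFS =====

-- reference shape: the (start, end) pairs from running offset c over the size list
def offs (c : Int) : List Int → List (Int × Int)
  | [] => []
  | n :: ns => (c, c + n) :: offs (c + n) ns

lemma offs_length (c : Int) (s : List Int) : (offs c s).length = s.length := by
  induction s generalizing c with
  | nil => rfl
  | cons n ns ih => simp [offs, ih]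

lemma offs_append (c : Int) (s t : List Int) :
    offs c (s ++ t) = offs c s ++ offs (c + s.sum) t := by
  induction s generalizing c with
  | nil => simp [offs]
  | cons n ns ih => simp [offs, ih]; ring_nf

-- characterisation of A's fold: over fresh distinct keys it appends key/range pairs
lemma foldA_items (d : PySem.Dict Int Int) (ks : List Int)
    (acc : PySem.Dict Int (Int × Int)) (c : Int)
    (hfresh : ∀ k ∈ ks, acc.contains k = false) (hnd : ks.Nodup) :
    (ks.foldl
      (fun (acc : PySem.Dict Int (Int × Int) × Int) i =>
        let n := d.getD i 0
        (acc.1.insert i (acc.2, acc.2 + n), acc.2 + n)) (acc, c)).1.items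
      = acc.items ++ ks.zip (offs c (ks.map (fun k => d.getD k 0))) := by
  induction ks generalizing acc c with
  | nil => simp [offs]
  | cons k ks ih =>
    simp only [List.foldl, List.map, offs, List.zip_cons_cons]
    rw [ih]
    · rw [PySem.Dict.items_insert_of_not_contains _ _ (hfresh k (by simp))]
      simp
    · intro k' hk'
      rw [PySem.Dict.contains_insert]
      have hne : k' ≠ k := by
        rcases List.nodup_cons.mp hnd with ⟨hk, _⟩
        exact fun h => hk (h ▸ hk')
      simp [hne, hfresh k' (by simp [hk'])]
    · exact (List.nodup_cons.mp hnd).2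

lemma zip_offs_shift (ks : List Int) (c t : Int) (s : List Int) :
    (ks.zip (offs c s)).map (fun p => (p.1, p.2.1 + t, p.2.2 + t)) = ks.zip (offs (c + t) s) := by
  induction ks generalizing c s with
  | nil => simp
  | cons k ks ih =>
    cases s with
    | nil => simp [offs]
    | cons n ns =>
      simp only [offs, List.zip_cons_cons, List.map_cons, ih]
      ring_nf

-- characterisation of B's divide and conquer: it returns the zipped range table and the total
lemma recB_eq (sz : Int → Int) (ks : List Int) :
    recB sz ks = (ks.zip (offs 0 (ks.map sz)), (ks.map sz).sum) := by
  fun_induction recB sz ks with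
  | case1 => simp [offs]
  | case2 k => simp [offs]
  | case3 k1 k2 rest l mid L R ihL ihR =>
    change (((recB sz (List.take mid l)).1 ++ (recB sz (List.drop mid l)).1.map
        (fun p => (p.1, p.2.1 + (recB sz (List.take mid l)).2, p.2.2 + (recB sz (List.take mid l)).2)),
        (recB sz (List.take mid l)).2 + (recB sz (List.drop mid l)).2)
      = (l.zip (offs 0 (l.map sz)), (l.map sz).sum))
    rw [ihL, ihR]
    dsimp only
    rw [zip_offs_shift]
    have hsplit : l = l.take mid ++ l.drop mid := (List.take_append_drop mid l).symm
    have hlen : (l.take mid).length = (offs 0 ((l.take mid).map sz)).length := by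
      simp [offs_length]
    conv_rhs => rw [hsplit]
    rw [List.map_append, offs_append, List.zip_append hlen]
    simp

-- keys of the zipped table are the keys
lemma map_fst_zip_offs (ks : List Int) (sz : Int → Int) (c : Int) :
    ((ks.zip (offs c (ks.map sz))).map Prod.fst) = ks := by
  rw [List.map_fst_zip]
  simp [offs_length]

-- ===== VERDICT (by name: the statement is the Claim_ definition above) =====
theorem build_offsets_spec : Claim_equal_build_offsets := by
  intro xs _ hpre
  unfold Spec_build_offsets build_offsets build_offsets_alt
  set d : PySem.Dict Int Int := PySem.Dict.mk xs with hd
  set ks := PySem.List.sorted d.keys (fun x => x) false with hks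
  have hkeys_nd : d.keys.Nodup := by simpa [hd, PySem.Dict.keys] using hpre
  have hnd : ks.Nodup := (PySem.List.sorted_perm _ _ _).nodup_iff.mpr hkeys_nd
  rw [foldA_items d ks _ _ (fun k _ => PySem.Dict.contains_empty k) hnd]
  simp only [recB_eq]
  have hpairs_nd : (((ks.zip (offs 0 (ks.map (fun k => d.getD k 0)))).map Prod.fst)).Nodup := by
    rw [map_fst_zip_offs]; exact hnd
  unfold PySem.Dict.ofList PySem.Dict.update
  rw [PySem.Dict.items_foldl_insert_fresh _ _ _ _ (fun a _ => PySem.Dict.contains_empty _) hpairs_nd]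
  simp [PySem.Dict.empty]
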